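-- pv_equiv track=rewrite | github.com/dzungapr6th99/cuopt_rl_training | source/cuopt_rl_training/cuopt_rl_training/tasks/direct/cuopt_rl_training/cuopt_rl_training_env.py | _build_routes_from_plan
-- ===== SOURCE A (Python) =====
-- from typing import Any, Dict, List, Tuple
--
-- def _build_routes_from_plan(plan_rows: List[Dict[str, Any]], n_vehicles: int) -> List[List[int]]:
--     routes = [[] for _ in range(n_vehicles)]
--     by_v = [[] for _ in range(n_vehicles)]
--     for r in plan_rows:
--         v = int(r["vehicle"])
--         if 0 <= v < n_vehicles:
--             by_v[v].append(r)
--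
--     for v in range(n_vehicles):
--         rows = sorted(by_v[v], key=lambda x: x["seq"])
--         locs = [int(r["location"]) for r in rows]
--         # Remove consecutive duplicates to avoid stuck steps.
--         compacted: List[int] = []
--         for loc in locs:
--             if not compacted or loc != compacted[-1]:
--                 compacted.append(loc)
--         routes[v] = compacted
--     return routes
-- ===== SOURCE B (Python) =====
-- from typing import Any, Dict, List
--
--
-- def _build_routes_from_plan(plan_rows: List[Dict[str, Any]], n_vehicles: int) -> List[List[int]]:
--     def compact(locs: List[int]) -> List[int]:
--         if not locs:
--             return []
--         return [locs[0]] + [b for a, b in zip(locs, locs[1:]) if b != a]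
--
--     return [
--         compact([int(r["location"])
--                  for r in sorted((r for r in plan_rows if int(r["vehicle"]) == v),
--                                  key=lambda r: r["seq"])])
--         for v in range(n_vehicles)
--     ]
-- ===== Notes on version B (the rewrite author's own statement) =====
-- stated objective: simpler
-- what changed: B replaces A's mutable bucket array, per-bucket sort loop and last-element-tracking dedup with a single comprehension over the vehicle range that filters the rows per vehicle, sorts by seq, and removes consecutive duplicates by zipping the location list with its own tail; Pre_ excludes only inputs where A raises KeyError (a row missing 'vehicle', or an in-range row missing 'seq' or 'location').
import Mathlib
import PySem

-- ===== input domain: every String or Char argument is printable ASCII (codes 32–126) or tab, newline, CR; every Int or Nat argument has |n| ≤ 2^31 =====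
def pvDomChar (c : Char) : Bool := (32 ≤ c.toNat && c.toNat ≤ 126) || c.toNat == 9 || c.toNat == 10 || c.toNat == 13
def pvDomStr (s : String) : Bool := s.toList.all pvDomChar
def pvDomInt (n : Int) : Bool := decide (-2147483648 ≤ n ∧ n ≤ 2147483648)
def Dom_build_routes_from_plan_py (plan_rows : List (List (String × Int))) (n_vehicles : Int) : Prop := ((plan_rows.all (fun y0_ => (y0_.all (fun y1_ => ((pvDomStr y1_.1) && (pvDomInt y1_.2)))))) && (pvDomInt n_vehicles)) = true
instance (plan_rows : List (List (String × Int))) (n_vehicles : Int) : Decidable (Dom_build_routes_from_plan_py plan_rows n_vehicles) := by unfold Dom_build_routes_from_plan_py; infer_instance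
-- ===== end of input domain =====

-- B replaces A's per-vehicle bucket-then-sort loops with one comprehension over the vehicle range, filtering the
-- rows for each vehicle and compacting consecutive duplicates with a zip of the list against its own tail (objective: simpler).

-- ===== PORT A =====
-- dict lookup r[k]: first match; the default 0 is only reached outside Pre_ (where Python raises KeyError)
def build_routes_from_plan_py (plan_rows : List (List (String × Int))) (n_vehicles : Int) : List (List Int) :=
  let routes : List (List Int) := List.replicate n_vehicles.toNat []
  let by_v : List (List (List (String × Int))) := List.replicate n_vehicles.toNat []
  let by_v := plan_rows.foldl (fun s r =>
      let v := ((PySem.Dict.mk r).get? "vehicle").getD 0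
      if 0 ≤ v ∧ v < n_vehicles then
        PySem.List.pySetD s v ((PySem.List.pyGetD s v []) ++ [r])
      else s) by_v
  (PySem.List.pyRange 0 n_vehicles 1).foldl (fun routes v =>
      let rows := PySem.List.sorted (PySem.List.pyGetD by_v v [])
                    (fun r => ((PySem.Dict.mk r).get? "seq").getD 0) false
      let locs := rows.map (fun r => ((PySem.Dict.mk r).get? "location").getD 0)
      let compacted := locs.foldl (fun c loc =>
          if c = [] ∨ c.getLast? ≠ some loc then c ++ [loc] else c) []
      PySem.List.pySetD routes v compacted) routes

-- ===== PORT B =====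
def compactAlt (locs : List Int) : List Int :=
  match locs with
  | [] => []
  | x :: rest => x :: ((x :: rest).zip rest).filterMap (fun p => if p.2 ≠ p.1 then some p.2 else none)

def build_routes_from_plan_py_alt (plan_rows : List (List (String × Int))) (n_vehicles : Int) : List (List Int) :=
  (PySem.List.pyRange 0 n_vehicles 1).map (fun v =>
    compactAlt
      ((PySem.List.sorted (plan_rows.filter (fun r => ((PySem.Dict.mk r).get? "vehicle").getD 0 == v))
          (fun r => ((PySem.Dict.mk r).get? "seq").getD 0) false).map
        (fun r => ((PySem.Dict.mk r).get? "location").getD 0)))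

-- ===== PRECONDITION & SPEC =====
-- Pre_ excludes exactly the inputs where Python A raises KeyError: a row without a "vehicle" key, or a row whose
-- vehicle lies in [0, n_vehicles) but which is missing "seq" or "location".
def Pre_build_routes_from_plan_py (plan_rows : List (List (String × Int))) (n_vehicles : Int) : Prop :=
  (plan_rows.all (fun r =>
    match (PySem.Dict.mk r).get? "vehicle" with
    | none => false
    | some v =>
      !(decide (0 ≤ v) && decide (v < n_vehicles)) ||
        (((PySem.Dict.mk r).get? "seq").isSome && ((PySem.Dict.mk r).get? "location").isSome))) = true
instance (plan_rows : List (List (String × Int))) (n_vehicles : Int) : Decidable (Pre_build_routes_from_plan_py plan_rows n_vehicles) := by unfold Pre_build_routes_from_plan_py; infer_instance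

def pvWitness_build_routes_from_plan_py : (List (List (String × Int))) × Int :=
  ([[("vehicle", 0), ("seq", 2), ("location", 5)], [("vehicle", 0), ("seq", 1), ("location", 5)]], 2)

def Spec_build_routes_from_plan_py (plan_rows : List (List (String × Int))) (n_vehicles : Int) (out : List (List Int)) : Prop := out = build_routes_from_plan_py_alt plan_rows n_vehicles
instance (plan_rows : List (List (String × Int))) (n_vehicles : Int) (out : List (List Int)) : Decidable (Spec_build_routes_from_plan_py plan_rows n_vehicles out) := by unfold Spec_build_routes_from_plan_py; infer_instance

-- ===== CLAIM (what is proved, stated in full; the proofs are below) =====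
def Claim_equal_build_routes_from_plan_py : Prop := ∀ (plan_rows : List (List (String × Int))) (n_vehicles : Int), Dom_build_routes_from_plan_py plan_rows n_vehicles → Pre_build_routes_from_plan_py plan_rows n_vehicles → Spec_build_routes_from_plan_py plan_rows n_vehicles (build_routes_from_plan_py plan_rows n_vehicles)

-- ===== LEMMAS AND PROOFS =====
theorem pyRange_zero_eq (n : Int) : PySem.List.pyRange 0 n 1 = (List.range n.toNat).map (fun k : Nat => (k : Int)) := by
  rw [PySem.List.pyRange_one, Int.sub_zero]
  refine List.map_congr_left ?_
  intro k _
  rw [zero_add]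

def dedFrom : Int → List Int → List Int
  | _, [] => []
  | last, x :: t => if x = last then dedFrom last t else x :: dedFrom x t

theorem dedA (locs : List Int) : ∀ (c : List Int) (l : Int), c.getLast? = some l →
    locs.foldl (fun c loc => if c = [] ∨ c.getLast? ≠ some loc then c ++ [loc] else c) c
      = c ++ dedFrom l locs := by
  induction locs with
  | nil => intro c l _; simp [dedFrom]
  | cons x t ih =>
    intro c l h
    have hne : c ≠ [] := by rintro rfl; simp at h
    by_cases hx : x = l
    · subst hx
      simp only [List.foldl_cons, hne, h, dedFrom]
      simpa using ih c x h
    · have hstep : (if c = [] ∨ c.getLast? ≠ some x then c ++ [x] else c) = c ++ [x] := by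
        rw [if_pos]; right; rw [h]; simp [Ne.symm hx]
      simp only [List.foldl_cons, hstep, dedFrom, if_neg hx]
      have hlast : (c ++ [x]).getLast? = some x := by simp
      rw [ih (c ++ [x]) x hlast, List.append_assoc]; rfl

def fB (p : Int × Int) : Option Int := if p.2 ≠ p.1 then some p.2 else none

theorem dedB (t : List Int) : ∀ x : Int,
    ((x :: t).zip t).filterMap fB = dedFrom x t := by
  induction t with
  | nil => intro x; simp [dedFrom]
  | cons y t ih =>
    intro x
    simp only [List.zip_cons_cons, List.filterMap_cons]
    have h1 : fB (x, y) = if y = x then none else some y := by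
      simp only [fB]; rw [ite_not]
    rw [h1]
    by_cases hy : y = x
    · rw [if_pos hy]
      show List.filterMap fB ((y :: t).zip t) = dedFrom x (y :: t)
      rw [ih y, dedFrom, if_pos hy, hy]
    · rw [if_neg hy]
      show y :: List.filterMap fB ((y :: t).zip t) = dedFrom x (y :: t)
      rw [ih y, dedFrom, if_neg hy]

theorem foldl_set_range (f : Nat → List Int) (s : List (List Int)) :
    ∀ m : Nat, m ≤ s.length →
    (List.range m).foldl (fun acc k => acc.set k (f k)) s = ((List.range m).map f) ++ s.drop m := by
  intro m
  induction m with
  | zero => intro _; simp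
  | succ m ih =>
    intro hm
    have hm' : m ≤ s.length := Nat.le_of_succ_le hm
    rw [List.range_succ, List.foldl_append, ih hm', List.map_append]
    simp only [List.foldl_cons, List.foldl_nil, List.map_cons, List.map_nil]
    have hlen : ((List.range m).map f).length = m := by simp
    rw [List.drop_eq_getElem_cons (by omega : m < s.length), List.set_append]
    simp [hlen]
    rw [List.drop_eq_getElem_cons (by omega : m < s.length), List.set_cons_zero]

def pvVeh (r : List (String × Int)) : Int := ((PySem.Dict.mk r).get? "vehicle").getD 0

theorem bucket (n : Int) (rows : List (List (String × Int))) :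
    ∀ (s : List (List (List (String × Int)))) (v : Int), s.length = n.toNat → 0 ≤ v → v < n →
    PySem.List.pyGetD (rows.foldl (fun s r =>
        if 0 ≤ pvVeh r ∧ pvVeh r < n then
          PySem.List.pySetD s (pvVeh r) (PySem.List.pyGetD s (pvVeh r) [] ++ [r])
        else s) s) v []
      = PySem.List.pyGetD s v [] ++ rows.filter (fun r => pvVeh r == v) := by
  induction rows with
  | nil => intro s v _ _ _; simp
  | cons r t ih =>
    intro s v hlen h0 h1
    have hi : v.toNat < s.length := by omega
    by_cases hc : 0 ≤ pvVeh r ∧ pvVeh r < n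
    · obtain ⟨hw0, hw1⟩ := hc
      have hj : (pvVeh r).toNat < s.length := by omega
      have hwe : pvVeh r = (((pvVeh r).toNat : Nat) : Int) := (Int.toNat_of_nonneg hw0).symm
      have hve : v = ((v.toNat : Nat) : Int) := (Int.toNat_of_nonneg h0).symm
      have hset : PySem.List.pySetD s (pvVeh r) (PySem.List.pyGetD s (pvVeh r) [] ++ [r])
          = s.set (pvVeh r).toNat (s[(pvVeh r).toNat] ++ [r]) := by
        conv_lhs => rw [hwe]
        rw [PySem.List.pySetD_natCast, PySem.List.pyGetD_natCast, List.getD_eq_getElem s [] hj]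
      simp only [List.foldl_cons]
      rw [if_pos (show 0 ≤ pvVeh r ∧ pvVeh r < n from ⟨hw0, hw1⟩), hset,
          ih _ v (by simp [hlen]) h0 h1]
      by_cases hwv : pvVeh r = v
      · rw [List.filter_cons_of_pos (by simp [hwv])]
        rw [hve, PySem.List.pyGetD_natCast, PySem.List.pyGetD_natCast,
            List.getD_eq_getElem _ [] (by simpa using hi), List.getD_eq_getElem s [] hi]
        simp [show (pvVeh r).toNat = v.toNat by omega]
      · rw [List.filter_cons_of_neg (by simp [hwv])]
        rw [hve, PySem.List.pyGetD_natCast, PySem.List.pyGetD_natCast,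
            List.getD_eq_getElem _ [] (by simpa using hi), List.getD_eq_getElem s [] hi]
        simp [show (pvVeh r).toNat ≠ v.toNat by omega]
    · have hne : ¬ ((pvVeh r == v) = true) := by
        intro h
        exact hc (by rw [eq_of_beq h]; exact ⟨h0, h1⟩)
      simp only [List.foldl_cons, if_neg hc]
      rw [ih s v hlen h0 h1]
      simp only [List.filter_cons]
      rw [if_neg hne]

theorem compact_eq (locs : List Int) :
    locs.foldl (fun c loc => if c = [] ∨ c.getLast? ≠ some loc then c ++ [loc] else c) []
      = compactAlt locs := by
  cases locs with
  | nil => rfl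
  | cons x t =>
    simp only [List.foldl_cons]
    rw [if_pos (Or.inl trivial), List.nil_append]
    rw [dedA t [x] x rfl]
    rw [show compactAlt (x :: t) = x :: ((x :: t).zip t).filterMap fB from rfl, dedB t x]
    rfl

-- ===== VERDICT (by name: the statement is the Claim_ definition above) =====
theorem build_routes_from_plan_py_spec : Claim_equal_build_routes_from_plan_py := by
  intro plan_rows n _ _
  show build_routes_from_plan_py plan_rows n = build_routes_from_plan_py_alt plan_rows n
  have hv : ∀ r : List (String × Int), ((PySem.Dict.mk r).get? "vehicle").getD 0 = pvVeh r :=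
    fun _ => rfl
  simp only [build_routes_from_plan_py, build_routes_from_plan_py_alt, hv]
  rw [pyRange_zero_eq n, List.foldl_map, List.map_map]
  simp only [PySem.List.pySetD_natCast]
  rw [foldl_set_range _ (List.replicate n.toNat []) n.toNat (by simp)]
  simp only [List.drop_replicate, Nat.sub_self, List.replicate_zero, List.append_nil]
  refine List.map_congr_left ?_
  intro k hk
  have hk' : k < n.toNat := List.mem_range.mp hk
  have h0 : (0:Int) ≤ (k:Int) := Int.natCast_nonneg k
  have h1 : ((k:Int)) < n := by omega
  rw [bucket n plan_rows (List.replicate n.toNat []) (k:Int) (by simp) h0 h1]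
  have hrep : PySem.List.pyGetD (List.replicate n.toNat ([] : List (List (String × Int))))
      ((k:Int)) [] = [] := by
    rw [PySem.List.pyGetD_natCast]
    simp [List.getD]
  rw [hrep, List.nil_append, compact_eq]
  rfl
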